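-- pv_equiv track=rewrite | github.com/louailou123/Streamlining-systematic-reviews-with-llms | agents/agent_3.py | _collect_existing_headers
-- ===== SOURCE A (Python) =====
-- from typing import Dict, Any, List, Tuple
--
-- def _is_real_value(value: Any) -> bool:
--     """True only for values worth keeping in exported CSVs."""
--     if value is None:
--         return False
--     s = str(value).strip()
--     if not s:
--         return False
--     if s.lower() in {"n/a", "none", "null", "nan", "unknown"}:
--         return False
--     return True
--
-- def _collect_existing_headers(rows: List[dict], preferred_order: List[str] | None = None) -> List[str]:
--     """Build headers only from fields that truly exist."""
--     preferred_order = preferred_order or []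
--     seen = set()
--     headers: List[str] = []
--
--     for key in preferred_order:
--         for row in rows:
--             if key in row and _is_real_value(row[key]):
--                 if key not in seen:
--                     seen.add(key)
--                     headers.append(key)
--                 break
--
--     for row in rows:
--         for key, value in row.items():
--             if key not in seen and _is_real_value(value):
--                 seen.add(key)
--                 headers.append(key)
--
--     return headers
-- ===== SOURCE B (Python) =====
-- from typing import Any, List
--
--
-- def _is_real_value(value: Any) -> bool:
--     """True only for values worth keeping in exported CSVs."""
--     if value is None:
--         return False
--     s = str(value).strip()
--     if not s:
--         return False
--     if s.lower() in {"n/a", "none", "null", "nan", "unknown"}: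
--         return False
--     return True
--
--
-- def _collect_existing_headers(rows: List[dict], preferred_order: List[str] | None = None) -> List[str]:
--     """One forward pass builds an ordered index of keys at their first real value;
--     headers are then assembled from that index without rescanning rows."""
--     valid = set()
--     order: List[str] = []
--     for row in rows:
--         for key, value in row.items():
--             if key in valid:
--                 continue
--             if _is_real_value(value):
--                 valid.add(key)
--                 order.append(key)
--
--     headers = [key for key in dict.fromkeys(preferred_order or []) if key in valid]
--     chosen = set(headers)
--     headers += [key for key in order if key not in chosen]
--     return headers
-- ===== Notes on version B (the rewrite author's own statement) =====
-- stated objective: faster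
-- what changed: A scans all rows once per preferred key and then rescans rows for the remaining keys with quadratic-prone list bookkeeping; B makes one forward pass building an ordered first-real-value index (valid set + order list) and assembles headers purely from that index (deduped preferred filter + set-filtered index), never rescanning rows.
import Mathlib
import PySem

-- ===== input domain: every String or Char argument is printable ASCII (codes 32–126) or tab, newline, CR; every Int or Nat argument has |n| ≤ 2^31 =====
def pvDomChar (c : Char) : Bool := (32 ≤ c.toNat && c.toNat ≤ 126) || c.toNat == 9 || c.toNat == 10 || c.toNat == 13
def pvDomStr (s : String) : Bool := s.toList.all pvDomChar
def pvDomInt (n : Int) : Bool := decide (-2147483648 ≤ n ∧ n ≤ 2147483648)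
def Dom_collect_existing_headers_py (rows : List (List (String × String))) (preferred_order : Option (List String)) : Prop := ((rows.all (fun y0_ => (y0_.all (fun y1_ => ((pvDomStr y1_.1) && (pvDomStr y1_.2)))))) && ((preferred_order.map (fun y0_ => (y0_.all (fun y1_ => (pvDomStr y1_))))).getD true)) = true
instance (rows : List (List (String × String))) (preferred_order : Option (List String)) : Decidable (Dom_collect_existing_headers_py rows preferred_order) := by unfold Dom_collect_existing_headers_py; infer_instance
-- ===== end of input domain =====

-- B replaces A's per-preferred-key rescans of rows by one forward pass that builds an ordered
-- first-real-value index (valid set + order list), from which headers are assembled without rescanning rows.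


-- ===== PORT A =====
-- _is_real_value (helper shared by both Pythons); the values here are strings, so str(value) = value
-- and value is never None
def isRealValue (v : String) : Bool :=
  let s := PySem.Str.strip v
  if s = "" then false
  else if PySem.Str.lower s ∈ (["n/a", "none", "null", "nan", "unknown"] : List String) then false
  else true

def collect_existing_headers_py (rows : List (List (String × String))) (preferred_order : Option (List String)) : List String :=
  let po := preferred_order.getD []        -- preferred_order or []
  -- first loop: for key in po: scan rows, break at the first row with key present and real
  -- ('break at first hit, then test seen' = 'test seen once if any row hits': List.any is that scan)
  let s1 : PySem.Set String × List String :=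
    po.foldl (fun acc key =>
      if rows.any (fun row => match List.lookup key row with
                              | some v => isRealValue v
                              | none => false) then
        if key ∈ acc.1 then acc else (PySem.Set.add acc.1 key, acc.2 ++ [key])
      else acc) (PySem.Set.empty, [])
  -- second loop: for row in rows: for key, value in row.items(): …
  let s2 : PySem.Set String × List String :=
    rows.foldl (fun acc row =>
      row.foldl (fun (acc : PySem.Set String × List String) kv =>
        if kv.1 ∉ acc.1 ∧ isRealValue kv.2 then (PySem.Set.add acc.1 kv.1, acc.2 ++ [kv.1])
        else acc) acc) s1
  s2.2

-- ===== PORT B =====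
def collect_existing_headers_py_alt (rows : List (List (String × String))) (preferred_order : Option (List String)) : List String :=
  -- one forward pass: record each key at its first real value
  let vo : PySem.Set String × List String :=
    rows.foldl (fun acc row =>
      row.foldl (fun (acc : PySem.Set String × List String) kv =>
        if kv.1 ∈ acc.1 then acc
        else if isRealValue kv.2 then (PySem.Set.add acc.1 kv.1, acc.2 ++ [kv.1])
        else acc) acc) (PySem.Set.empty, [])
  -- assembly: deduped preferred keys that are valid, then the rest of the index; rows are never rescanned
  let h1 : List String :=
    (PySem.List.dedup (preferred_order.getD [])).filter (fun key => decide (key ∈ vo.1))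
  let chosen : PySem.Set String := PySem.Set.ofList h1
  h1 ++ vo.2.filter (fun key => decide (key ∉ chosen))

-- ===== PRECONDITION & SPEC =====
-- Pre_ excludes rows whose association lists carry duplicate keys: such rows cannot arise from a
-- Python dict (on a non-dict row A raises AttributeError at row.items()), and the dict-as-assoc-list
-- model is ambiguous there (first-match lookup vs. Python's overwrite-on-insert).
def Pre_collect_existing_headers_py (rows : List (List (String × String))) (preferred_order : Option (List String)) : Prop :=
  ∀ row ∈ rows, (row.map Prod.fst).Nodup
instance (rows : List (List (String × String))) (preferred_order : Option (List String)) : Decidable (Pre_collect_existing_headers_py rows preferred_order) := by unfold Pre_collect_existing_headers_py; infer_instance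

def pvWitness_collect_existing_headers_py : (List (List (String × String))) × Option (List String) :=
  ([[("a", "1"), ("b", "")], [("c", "n/a")]], some ["b", "a"])

def Spec_collect_existing_headers_py (rows : List (List (String × String))) (preferred_order : Option (List String)) (out : List String) : Prop := out = collect_existing_headers_py_alt rows preferred_order
instance (rows : List (List (String × String))) (preferred_order : Option (List String)) (out : List String) : Decidable (Spec_collect_existing_headers_py rows preferred_order out) := by unfold Spec_collect_existing_headers_py; infer_instance

-- ===== CLAIM (what is proved, stated in full; the proofs are below) =====
def Claim_equal_collect_existing_headers_py : Prop := ∀ (rows : List (List (String × String))) (preferred_order : Option (List String)), Dom_collect_existing_headers_py rows preferred_order → Pre_collect_existing_headers_py rows preferred_order → Spec_collect_existing_headers_py rows preferred_order (collect_existing_headers_py rows preferred_order)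

-- ===== LEMMAS AND PROOFS =====
def pvF (hs : List String) (pairs : List (String × String)) : List String :=
  pairs.foldl (fun hs kv => if kv.1 ∉ hs ∧ isRealValue kv.2 then hs ++ [kv.1] else hs) hs

theorem pv_pairFold (pairs : List (String × String)) (seen hs : List String)
    (hinv : ∀ k, k ∈ seen ↔ k ∈ hs) :
    (pairs.foldl (fun (acc : PySem.Set String × List String) kv =>
        if kv.1 ∉ acc.1 ∧ isRealValue kv.2 then (PySem.Set.add acc.1 kv.1, acc.2 ++ [kv.1])
        else acc) (seen, hs)).2 = pvF hs pairs ∧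
    (∀ k, k ∈ (pairs.foldl (fun (acc : PySem.Set String × List String) kv =>
        if kv.1 ∉ acc.1 ∧ isRealValue kv.2 then (PySem.Set.add acc.1 kv.1, acc.2 ++ [kv.1])
        else acc) (seen, hs)).1 ↔ k ∈ (pairs.foldl (fun (acc : PySem.Set String × List String) kv =>
        if kv.1 ∉ acc.1 ∧ isRealValue kv.2 then (PySem.Set.add acc.1 kv.1, acc.2 ++ [kv.1])
        else acc) (seen, hs)).2) := by
  induction pairs generalizing seen hs with
  | nil => exact ⟨rfl, hinv⟩
  | cons kv rest ih =>
    by_cases hc : kv.1 ∉ seen ∧ isRealValue kv.2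
    · have hns : kv.1 ∉ hs := fun h => hc.1 ((hinv kv.1).2 h)
      have hinv' : ∀ k, k ∈ PySem.Set.add seen kv.1 ↔ k ∈ hs ++ [kv.1] := by
        intro k
        rw [PySem.Set.mem_add]
        simp [hinv k]
      have := ih (PySem.Set.add seen kv.1) (hs ++ [kv.1]) hinv'
      simpa [List.foldl_cons, pvF, hc, hns, hc.2] using this
    · have hc' : ¬(kv.1 ∉ hs ∧ isRealValue kv.2 = true) := by
        intro h; exact hc ⟨fun hm => h.1 ((hinv kv.1).1 hm), h.2⟩
      have := ih seen hs hinv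
      simpa [List.foldl_cons, pvF, hc, hc'] using this

theorem pv_mem_pvF (pairs : List (String × String)) (hs : List String) (k : String) :
    k ∈ pvF hs pairs ↔ k ∈ hs ∨ ∃ v, (k, v) ∈ pairs ∧ isRealValue v = true := by
  induction pairs generalizing hs with
  | nil => simp [pvF]
  | cons kv rest ih =>
    by_cases hc : kv.1 ∉ hs ∧ isRealValue kv.2
    · simp only [pvF, List.foldl_cons, if_pos hc]
      rw [show (rest.foldl (fun hs kv => if kv.1 ∉ hs ∧ isRealValue kv.2 then hs ++ [kv.1] else hs) (hs ++ [kv.1])) = pvF (hs ++ [kv.1]) rest from rfl, ih]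
      constructor
      · rintro (h | ⟨v, hv, hr⟩)
        · rcases List.mem_append.1 h with h | h
          · exact Or.inl h
          · simp only [List.mem_singleton] at h
            exact Or.inr ⟨kv.2, by simp [h, hc.2]⟩
        · exact Or.inr ⟨v, List.mem_cons_of_mem _ hv, hr⟩
      · rintro (h | ⟨v, hv, hr⟩)
        · exact Or.inl (List.mem_append.2 (Or.inl h))
        · rcases List.mem_cons.1 hv with h | h
          · left; apply List.mem_append.2; right; simp [show k = kv.1 from congrArg Prod.fst h]
          · exact Or.inr ⟨v, h, hr⟩
    · simp only [pvF, List.foldl_cons, if_neg hc]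
      rw [show (rest.foldl (fun hs kv => if kv.1 ∉ hs ∧ isRealValue kv.2 then hs ++ [kv.1] else hs) hs) = pvF hs rest from rfl, ih]
      constructor
      · rintro (h | ⟨v, hv, hr⟩)
        · exact Or.inl h
        · exact Or.inr ⟨v, List.mem_cons_of_mem _ hv, hr⟩
      · rintro (h | ⟨v, hv, hr⟩)
        · exact Or.inl h
        · rcases List.mem_cons.1 hv with h | h
          · -- kv = (k, v), but hc fails: either kv.1 ∈ hs or not real
            have hk : kv.1 = k := (congrArg Prod.fst h).symm
            have hv2 : kv.2 = v := (congrArg Prod.snd h).symm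
            rw [not_and_or] at hc
            rcases hc with hc | hc
            · left; rw [← hk]; exact not_not.1 hc
            · exact absurd (hv2 ▸ hr) hc
          · exact Or.inr ⟨v, h, hr⟩

theorem pv_pvF_decomp (pairs : List (String × String)) (hs : List String) :
    pvF hs pairs = hs ++ (pvF [] pairs).filter (fun k => decide (k ∉ hs)) := by
  induction pairs generalizing hs with
  | nil => simp [pvF]
  | cons kv rest ih =>
    by_cases hr : isRealValue kv.2
    · have hG : pvF [] (kv :: rest) = kv.1 :: (pvF [] rest).filter (fun k => decide (k ≠ kv.1)) := by
        simp only [pvF, List.foldl_cons]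
        rw [if_pos (by simp [hr])]
        rw [List.nil_append]
        rw [show (rest.foldl (fun hs kv => if kv.1 ∉ hs ∧ isRealValue kv.2 then hs ++ [kv.1] else hs) [kv.1]) = pvF [kv.1] rest from rfl, ih]
        simp [pvF]
      by_cases hm : kv.1 ∈ hs
      · have : pvF hs (kv :: rest) = pvF hs rest := by
          simp [pvF, List.foldl_cons, hm]
        rw [this, ih, hG]
        congr 1
        rw [List.filter_cons]
        simp only [hm, not_true, decide_false]
        rw [List.filter_filter]
        apply List.filter_congr
        intro x hx
        by_cases hxk : x = kv.1
        · subst hxk; simp [hm]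
        · simp [hxk]
      · have : pvF hs (kv :: rest) = pvF (hs ++ [kv.1]) rest := by
          simp [pvF, List.foldl_cons, hm, hr]
        rw [this, ih, hG]
        rw [List.filter_cons]
        simp only [hm, not_false_iff, decide_true]
        rw [List.append_assoc]
        congr 1
        rw [List.singleton_append]
        congr 1
        rw [List.filter_filter]
        apply List.filter_congr
        intro x hx
        by_cases hxk : x = kv.1
        · subst hxk; simp
        · by_cases hxh : x ∈ hs <;> simp [hxk, hxh]
    · have h1 : pvF hs (kv :: rest) = pvF hs rest := by simp [pvF, List.foldl_cons, hr]
      have h2 : pvF [] (kv :: rest) = pvF [] rest := by simp [pvF, List.foldl_cons, hr]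
      rw [h1, h2, ih]

theorem pv_pref (valid : List String) (po : List String) (hs : List String) :
    po.foldl (fun hs key => if key ∈ valid ∧ key ∉ hs then hs ++ [key] else hs) hs
      = hs ++ (PySem.List.dedup po).filter (fun k => decide (k ∈ valid) && !decide (k ∈ hs)) := by
  induction po generalizing hs with
  | nil => simp [PySem.List.dedup, PySem.Set.ofList]
  | cons key rest ih =>
    rw [List.foldl_cons]
    rw [show PySem.List.dedup (key :: rest) = key :: PySem.Set.discard (PySem.List.dedup rest) key
      from PySem.Set.ofList_cons (x := key) (xs := rest)]
    by_cases hc : key ∈ valid ∧ key ∉ hs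
    · rw [if_pos hc, ih, List.filter_cons]
      simp only [hc.1, decide_true, hc.2, decide_false, Bool.not_false, Bool.and_true, if_true]
      rw [List.append_assoc, List.singleton_append]
      congr 2
      rw [PySem.Set.discard, List.filter_filter]
      apply List.filter_congr
      intro x hx
      by_cases hxk : x = key
      · subst hxk; simp
      · by_cases hxh : x ∈ hs <;> simp [hxk, hxh]
    · rw [if_neg hc, ih, List.filter_cons]
      have : (decide (key ∈ valid) && !decide (key ∈ hs)) = false := by
        rw [not_and_or, not_not] at hc
        rcases hc with hc | hc <;> simp [hc]
      rw [this, if_neg (by simp)]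
      congr 1
      rw [PySem.Set.discard, List.filter_filter]
      apply List.filter_congr
      intro x hx
      by_cases hxk : x = key
      · subst hxk; simp [this]
      · simp [hxk]

theorem pv_lookup_real (key : String) (row : List (String × String))
    (h : (row.map Prod.fst).Nodup) :
    ((match List.lookup key row with
      | some v => isRealValue v
      | none => false) = true) ↔ ∃ v, (key, v) ∈ row ∧ isRealValue v = true := by
  induction row with
  | nil => simp [List.lookup]
  | cons p rest ih =>
    rw [List.map_cons] at h
    have hnd := List.nodup_cons.1 h
    by_cases he : key = p.1
    · have : List.lookup key (p :: rest) = some p.2 := by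
        simp [List.lookup, he]
      rw [this]
      constructor
      · intro hr
        exact ⟨p.2, by simp [he, hr]⟩
      · rintro ⟨v, hv, hr⟩
        rcases List.mem_cons.1 hv with hv | hv
        · rwa [show v = p.2 from congrArg Prod.snd hv] at hr
        · exact absurd (he ▸ List.mem_map_of_mem (f := Prod.fst) hv) hnd.1
    · have : List.lookup key (p :: rest) = List.lookup key rest := by
        simp [List.lookup, show (key == p.1) = false from beq_eq_false_iff_ne.2 he]
      rw [this, ih hnd.2]
      constructor
      · rintro ⟨v, hv, hr⟩; exact ⟨v, List.mem_cons_of_mem _ hv, hr⟩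
      · rintro ⟨v, hv, hr⟩
        rcases List.mem_cons.1 hv with hv | hv
        · exact absurd (congrArg Prod.fst hv) he
        · exact ⟨v, hv, hr⟩

theorem pv_phase1 (cond : String → Bool) (valid : List String)
    (hc : ∀ key, cond key = true ↔ key ∈ valid)
    (po : List String) (seen hs : List String) (hinv : ∀ k, k ∈ seen ↔ k ∈ hs) :
    (po.foldl (fun (acc : PySem.Set String × List String) key =>
        if cond key then
          (if key ∈ acc.1 then acc else (PySem.Set.add acc.1 key, acc.2 ++ [key]))
        else acc) (seen, hs)).2
      = po.foldl (fun hs key => if key ∈ valid ∧ key ∉ hs then hs ++ [key] else hs) hs ∧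
    (∀ k, k ∈ (po.foldl (fun (acc : PySem.Set String × List String) key =>
        if cond key then
          (if key ∈ acc.1 then acc else (PySem.Set.add acc.1 key, acc.2 ++ [key]))
        else acc) (seen, hs)).1 ↔ k ∈ (po.foldl (fun (acc : PySem.Set String × List String) key =>
        if cond key then
          (if key ∈ acc.1 then acc else (PySem.Set.add acc.1 key, acc.2 ++ [key]))
        else acc) (seen, hs)).2) := by
  induction po generalizing seen hs with
  | nil => exact ⟨rfl, hinv⟩
  | cons key rest ih =>
    by_cases h1 : cond key
    · by_cases h2 : key ∈ seen
      · have h2' : key ∈ hs := (hinv key).1 h2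
        have hB : ¬(key ∈ valid ∧ key ∉ hs) := fun h => h.2 h2'
        have := ih seen hs hinv
        simpa [List.foldl_cons, h1, h2, hB] using this
      · have h2' : key ∉ hs := fun h => h2 ((hinv key).2 h)
        have hB : key ∈ valid ∧ key ∉ hs := ⟨(hc key).1 h1, h2'⟩
        have hinv' : ∀ k, k ∈ PySem.Set.add seen key ↔ k ∈ hs ++ [key] := by
          intro k; rw [PySem.Set.mem_add]; simp [hinv k]
        have := ih (PySem.Set.add seen key) (hs ++ [key]) hinv'
        simpa [List.foldl_cons, h1, h2, hB] using this
    · have hB : ¬(key ∈ valid ∧ key ∉ hs) := fun h => h1 ((hc key).2 h.1)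
      have := ih seen hs hinv
      simpa [List.foldl_cons, h1, hB] using this

theorem pv_foldl_rows {α : Type} (g : α → String × String → α) (rows : List (List (String × String))) (init : α) :
    rows.foldl (fun acc row => row.foldl g acc) init = rows.flatten.foldl g init := by
  induction rows generalizing init with
  | nil => rfl
  | cons r rs ih => simp [List.foldl, ih, List.foldl_append]

theorem pv_main (rows : List (List (String × String))) (preferred_order : Option (List String))
    (hpre : ∀ row ∈ rows, (row.map Prod.fst).Nodup) :
    collect_existing_headers_py rows preferred_order = collect_existing_headers_py_alt rows preferred_order := by
  simp only [collect_existing_headers_py, collect_existing_headers_py_alt]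
  -- B's builder step equals A's second-loop step
  have hstep : (fun (acc : PySem.Set String × List String) (kv : String × String) =>
        if kv.1 ∈ acc.1 then acc
        else if isRealValue kv.2 then (PySem.Set.add acc.1 kv.1, acc.2 ++ [kv.1])
        else acc)
      = (fun (acc : PySem.Set String × List String) kv =>
        if kv.1 ∉ acc.1 ∧ isRealValue kv.2 then (PySem.Set.add acc.1 kv.1, acc.2 ++ [kv.1])
        else acc) := by
    funext acc kv
    by_cases h1 : kv.1 ∈ acc.1
    · simp [h1]
    · by_cases h2 : isRealValue kv.2 <;> simp [h1, h2]
  rw [hstep]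
  rw [pv_foldl_rows, pv_foldl_rows]
  have htriv : ∀ k : String, k ∈ (PySem.Set.empty : PySem.Set String) ↔ k ∈ ([] : List String) := by
    intro k; simp [PySem.Set.empty]
  obtain ⟨hB2, hBinv⟩ := pv_pairFold rows.flatten PySem.Set.empty [] htriv
  set vo := rows.flatten.foldl (fun (acc : PySem.Set String × List String) kv =>
        if kv.1 ∉ acc.1 ∧ isRealValue kv.2 then (PySem.Set.add acc.1 kv.1, acc.2 ++ [kv.1])
        else acc) (PySem.Set.empty, []) with hvo
  have hcond : ∀ key : String, (rows.any (fun row => match List.lookup key row with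
      | some v => isRealValue v
      | none => false)) = true ↔ key ∈ pvF [] rows.flatten := by
    intro key
    rw [List.any_eq_true, pv_mem_pvF]
    simp only [List.not_mem_nil, false_or]
    constructor
    · rintro ⟨row, hrow, hm⟩
      obtain ⟨v, hv, hr⟩ := (pv_lookup_real key row (hpre row hrow)).1 hm
      exact ⟨v, List.mem_flatten.2 ⟨row, hrow, hv⟩, hr⟩
    · rintro ⟨v, hv, hr⟩
      obtain ⟨row, hrow, hvr⟩ := List.mem_flatten.1 hv
      exact ⟨row, hrow, (pv_lookup_real key row (hpre row hrow)).2 ⟨v, hvr, hr⟩⟩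
  obtain ⟨hA1, hAinv⟩ := pv_phase1 _ (pvF [] rows.flatten) hcond (preferred_order.getD []) PySem.Set.empty [] htriv
  set s1 := (preferred_order.getD []).foldl (fun (acc : PySem.Set String × List String) key =>
      if rows.any (fun row => match List.lookup key row with
                              | some v => isRealValue v
                              | none => false) then
        if key ∈ acc.1 then acc else (PySem.Set.add acc.1 key, acc.2 ++ [key])
      else acc) (PySem.Set.empty, []) with hs1
  -- B's preferred filter, with the set membership replaced by membership in pvF [] flatten
  have hfil : (PySem.List.dedup (preferred_order.getD [])).filter (fun key => decide (key ∈ vo.1))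
      = (PySem.List.dedup (preferred_order.getD [])).filter (fun key => decide (key ∈ pvF [] rows.flatten)) := by
    apply List.filter_congr
    intro key _
    have hmem : key ∈ vo.1 ↔ key ∈ pvF [] rows.flatten := by rw [hBinv key, hB2]
    by_cases h : key ∈ vo.1
    · simp [h, hmem.1 h]
    · have h2 : key ∉ pvF [] rows.flatten := fun hh => h (hmem.2 hh)
      simp [h, h2]
  rw [hfil]
  -- A's preferred pass produces exactly that filtered dedup
  have hA1' : s1.2 = (PySem.List.dedup (preferred_order.getD [])).filter
      (fun key => decide (key ∈ pvF [] rows.flatten)) := by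
    rw [hA1, pv_pref]
    simp
  obtain ⟨hA2, _⟩ := pv_pairFold rows.flatten s1.1 s1.2 hAinv
  rw [show s1 = (s1.1, s1.2) from rfl] at hA2
  rw [hA2, pv_pvF_decomp, hA1', hB2]
  congr 1
  apply List.filter_congr
  intro key _
  have hofl : key ∈ PySem.Set.ofList ((PySem.List.dedup (preferred_order.getD [])).filter
      (fun key => decide (key ∈ pvF [] rows.flatten)))
      ↔ key ∈ (PySem.List.dedup (preferred_order.getD [])).filter
      (fun key => decide (key ∈ pvF [] rows.flatten)) := PySem.Set.mem_ofList _ _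
  by_cases h : key ∈ (PySem.List.dedup (preferred_order.getD [])).filter
      (fun key => decide (key ∈ pvF [] rows.flatten))
  · simp [hofl.2 h]
  · have h2 : key ∉ PySem.Set.ofList ((PySem.List.dedup (preferred_order.getD [])).filter
        (fun key => decide (key ∈ pvF [] rows.flatten))) := fun hh => h (hofl.1 hh)
    simp [h2]

-- ===== VERDICT (by name: the statement is the Claim_ definition above) =====
theorem collect_existing_headers_py_spec : Claim_equal_collect_existing_headers_py := by
  intro rows preferred_order _hdom hpre
  unfold Spec_collect_existing_headers_py
  exact pv_main rows preferred_order hpre
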